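-- pv_equiv track=rewrite | github.com/bryandavidhaas-dotcom/wandering-narwhal-zoom | inspect_mongodb_cluster.py | _looks_like_career_data
-- ===== SOURCE A (Python) =====
-- def _looks_like_career_data(document):
--     """Check if document looks like career data"""
--     if not document:
--         return False
--
--     career_indicators = [
--         'title', 'career', 'job', 'position', 'role',
--         'salary', 'skills', 'experience', 'description'
--     ]
--
--     doc_keys = [str(key).lower() for key in document.keys()]
--     matches = sum(1 for indicator in career_indicators
--                  if any(indicator in key for key in doc_keys))
--
--     return matches >= 3  # If 3+ career-related fields, likely career data
-- ===== SOURCE B (Python) =====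
-- def _looks_like_career_data(document):
--     """Check if document looks like career data"""
--     if not document:
--         return False
--
--     indicator_set = {
--         'title', 'career', 'job', 'position', 'role',
--         'salary', 'skills', 'experience', 'description'
--     }
--     lengths = sorted({len(w) for w in indicator_set})
--
--     # Scan every substring of each key whose length matches an indicator length
--     # and look it up in the indicator set, collecting the distinct hits.
--     matched = set()
--     for key in document.keys():
--         k = str(key).lower()
--         n = len(k)
--         for i in range(n):
--             for L in lengths:
--                 if i + L <= n and k[i:i+L] in indicator_set:
--                     matched.add(k[i:i+L])
--
--     return len(matched) >= 3
-- ===== Notes on version B (the rewrite author's own statement) =====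
-- stated objective: alternative
-- what changed: Instead of running a substring search of each indicator over each key (any-over-keys per indicator), B enumerates each key's substrings at the indicator lengths and looks them up in a hash set of indicators, collecting the distinct hits in a set and thresholding its size at 3.
import Mathlib
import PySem

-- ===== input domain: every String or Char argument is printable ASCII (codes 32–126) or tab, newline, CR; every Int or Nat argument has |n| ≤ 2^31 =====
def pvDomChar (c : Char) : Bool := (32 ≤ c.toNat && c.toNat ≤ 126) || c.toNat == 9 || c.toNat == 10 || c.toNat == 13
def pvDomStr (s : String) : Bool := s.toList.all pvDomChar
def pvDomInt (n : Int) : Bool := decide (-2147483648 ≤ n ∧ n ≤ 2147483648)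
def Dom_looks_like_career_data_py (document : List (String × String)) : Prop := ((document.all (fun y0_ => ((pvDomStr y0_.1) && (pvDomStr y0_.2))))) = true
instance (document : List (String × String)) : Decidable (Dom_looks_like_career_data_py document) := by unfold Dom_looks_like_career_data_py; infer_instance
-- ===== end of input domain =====

-- B enumerates each key's substrings at the indicator lengths and looks them up in a set of
-- indicators, collecting the distinct hits, instead of running a per-indicator substring
-- search over all keys (alternative algorithm, same result).


-- the career_indicators literal of A (B builds the same strings as a set)
def careerIndicators : List String :=
  ["title", "career", "job", "position", "role",
   "salary", "skills", "experience", "description"]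

-- ===== PORT A =====
def looks_like_career_data_py (document : List (String × String)) : Bool :=
  if document = [] then false
  else
    let doc_keys := ((PySem.Dict.mk document).keys).map (fun key => PySem.Str.lower key)
    let matchCount := (careerIndicators.map (fun indicator =>
        if doc_keys.any (fun key => PySem.Str.isIn indicator key) then (1 : Int) else 0)).sum
    decide (matchCount ≥ 3)

-- ===== PORT B =====
-- B's indicator_set = {'title', …} and lengths = sorted({len(w) for w in indicator_set})
def careerIndicatorSet : PySem.Set String := PySem.Set.ofList careerIndicators
def indicatorLengths : List Int :=
  PySem.List.sorted (PySem.Set.ofList (careerIndicators.map PySem.Str.len)) (fun x => x) false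

def looks_like_career_data_py_alt (document : List (String × String)) : Bool :=
  if document = [] then false
  else
    let matched := ((PySem.Dict.mk document).keys).foldl
      (fun s key =>
        let k := PySem.Str.lower key
        let n := PySem.Str.len k
        (PySem.List.pyRange 0 n).foldl
          (fun s i =>
            indicatorLengths.foldl
              (fun s L =>
                if i + L ≤ n ∧ PySem.Set.contains careerIndicatorSet (PySem.Str.slice k (some i) (some (i + L))) = true
                then PySem.Set.add s (PySem.Str.slice k (some i) (some (i + L)))
                else s) s) s)
      PySem.Set.empty
    decide (PySem.Set.len matched ≥ 3)

-- ===== PRECONDITION & SPEC =====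
def Spec_looks_like_career_data_py (document : List (String × String)) (out : Bool) : Prop := out = looks_like_career_data_py_alt document
instance (document : List (String × String)) (out : Bool) : Decidable (Spec_looks_like_career_data_py document out) := by unfold Spec_looks_like_career_data_py; infer_instance

-- ===== CLAIM (what is proved, stated in full; the proofs are below) =====
def Claim_equal_looks_like_career_data_py : Prop := ∀ (document : List (String × String)), Dom_looks_like_career_data_py document → Spec_looks_like_career_data_py document (looks_like_career_data_py document)

-- ===== LEMMAS AND PROOFS =====

-- generic: a fold whose step is characterised by 'x ∈ step s a ↔ x ∈ s ∨ P a x'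
theorem foldl_mem_of_step {α : Type} (step : PySem.Set String → α → PySem.Set String)
    (P : α → String → Prop)
    (hstep : ∀ s a x, x ∈ step s a ↔ x ∈ s ∨ P a x) :
    ∀ (l : List α) (s : PySem.Set String) (x : String),
      x ∈ l.foldl step s ↔ x ∈ s ∨ ∃ a ∈ l, P a x := by
  intro l
  induction l with
  | nil => simp
  | cons a t ih =>
    intro s x
    simp only [List.foldl_cons, ih, hstep, List.mem_cons]
    constructor
    · rintro ((h | h) | ⟨b, hb, h⟩)
      · exact Or.inl h
      · exact Or.inr ⟨a, Or.inl rfl, h⟩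
      · exact Or.inr ⟨b, Or.inr hb, h⟩
    · rintro (h | ⟨b, (rfl | hb), h⟩)
      · exact Or.inl (Or.inl h)
      · exact Or.inl (Or.inr h)
      · exact Or.inr ⟨b, hb, h⟩

theorem foldl_nodup_of_step {α : Type} (step : PySem.Set String → α → PySem.Set String)
    (hstep : ∀ s a, s.Nodup → (step s a).Nodup) :
    ∀ (l : List α) (s : PySem.Set String), s.Nodup → (l.foldl step s).Nodup := by
  intro l
  induction l with
  | nil => intro s h; simpa using h
  | cons a t ih => intro s h; exact ih _ (hstep s a h)

theorem infix_iff_take_drop (l d : List Char) : (l <:+: d) ↔ ∃ i, l = (d.drop i).take l.length := by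
  constructor
  · rintro ⟨s, t, rfl⟩
    exact ⟨s.length, by simp⟩
  · rintro ⟨i, h⟩
    rw [h]
    exact (((d.drop i).take_prefix l.length).isInfix).trans (d.drop_suffix i).isInfix

-- the per-key predicate of B's scan ↔ the per-key test of A
theorem key_scan_iff (key x : String) :
    (∃ i ∈ PySem.List.pyRange 0 (PySem.Str.len (PySem.Str.lower key)),
       ∃ L ∈ indicatorLengths,
         (i + L ≤ PySem.Str.len (PySem.Str.lower key) ∧
          PySem.Set.contains careerIndicatorSet
            (PySem.Str.slice (PySem.Str.lower key) (some i) (some (i + L))) = true) ∧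
         x = PySem.Str.slice (PySem.Str.lower key) (some i) (some (i + L)))
    ↔ (x ∈ careerIndicators ∧ PySem.Str.isIn x (PySem.Str.lower key) = true) := by
  set k := PySem.Str.lower key with hk
  have hlen : PySem.Str.len k = (k.toList.length : Int) := PySem.Str.len_eq k
  constructor
  · rintro ⟨i, hi, L, hL, ⟨hle, hcon⟩, rfl⟩
    have hi' := PySem.List.mem_pyRange_one.mp hi
    have hLpos : (1 : Int) ≤ L := by
      have : ∀ y ∈ indicatorLengths, (1 : Int) ≤ y := by decide
      exact this L hL
    have hmem : PySem.Str.slice k (some i) (some (i + L)) ∈ careerIndicators := by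
      have := (PySem.Set.contains_iff careerIndicatorSet _).mp hcon
      simpa [careerIndicatorSet, PySem.Set.mem_ofList] using this
    refine ⟨hmem, ?_⟩
    rw [PySem.Str.isIn_iff_infix]
    have h0i : 0 ≤ i := hi'.1
    have h0L : 0 ≤ L := by omega
    obtain ⟨j, rfl⟩ : ∃ j : Nat, i = (j : Int) := ⟨i.toNat, by omega⟩
    obtain ⟨m, rfl⟩ : ∃ m : Nat, L = (m : Int) := ⟨L.toNat, by omega⟩
    have : (PySem.Str.slice k (some (j : Int)) (some ((j : Int) + (m : Int)))).toList
        = (k.toList.drop j).take m := by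
      rw [PySem.Str.toList_slice, PySem.Chars.slice_eq_listSlice, PySem.List.slice_natCast_add]
    rw [this]
    exact (((k.toList.drop j).take_prefix m).isInfix).trans
      (k.toList.drop_suffix j).isInfix
  · rintro ⟨hmem, hin⟩
    have hinf := (PySem.Str.isIn_iff_infix x k).mp hin
    obtain ⟨j, hj⟩ := (infix_iff_take_drop x.toList k.toList).mp hinf
    have hxlen : 1 ≤ x.toList.length := by
      have : ∀ y ∈ careerIndicators, 1 ≤ y.toList.length := by decide
      exact this x hmem
    have hfit : x.toList.length ≤ k.toList.length - j := by
      have := congrArg List.length hj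
      rw [List.length_take, List.length_drop] at this
      omega
    have hjlt : j < k.toList.length := by omega
    have hslice : PySem.Str.slice k (some (j : Int)) (some ((j : Int) + (x.toList.length : Int))) = x := by
      have h1 : (PySem.Str.slice k (some (j : Int)) (some ((j : Int) + (x.toList.length : Int)))).toList
          = (k.toList.drop j).take x.toList.length := by
        rw [PySem.Str.toList_slice, PySem.Chars.slice_eq_listSlice, PySem.List.slice_natCast_add]
      have h2 : (PySem.Str.slice k (some (j : Int)) (some ((j : Int) + (x.toList.length : Int)))).toList = x.toList := by
        rw [h1, ← hj]
      exact String.toList_inj.mp h2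
    refine ⟨(j : Int), ?_, (x.toList.length : Int), ?_, ⟨?_, ?_⟩, ?_⟩
    · rw [PySem.List.mem_pyRange_one, hlen]; omega
    · have : ∀ y ∈ careerIndicators, PySem.Str.len y ∈ indicatorLengths := by decide
      have hx := this x hmem
      rwa [PySem.Str.len_eq] at hx
    · rw [hlen]; omega
    · rw [hslice]
      exact (PySem.Set.contains_iff careerIndicatorSet x).mpr
        (by simpa [careerIndicatorSet, PySem.Set.mem_ofList] using hmem)
    · exact hslice.symm

-- ===== VERDICT (by name: the statement is the Claim_ definition above) =====
theorem looks_like_career_data_py_spec : Claim_equal_looks_like_career_data_py := by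
  intro document _
  unfold Spec_looks_like_career_data_py looks_like_career_data_py looks_like_career_data_py_alt
  by_cases hd : document = []
  · simp [hd]
  · rw [if_neg hd, if_neg hd]
    set keys := (PySem.Dict.mk document).keys with hkeys
    set step := fun (s : PySem.Set String) (key : String) =>
        (PySem.List.pyRange 0 (PySem.Str.len (PySem.Str.lower key))).foldl
          (fun s i =>
            indicatorLengths.foldl
              (fun s L =>
                if i + L ≤ PySem.Str.len (PySem.Str.lower key) ∧
                   PySem.Set.contains careerIndicatorSet
                     (PySem.Str.slice (PySem.Str.lower key) (some i) (some (i + L))) = true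
                then PySem.Set.add s (PySem.Str.slice (PySem.Str.lower key) (some i) (some (i + L)))
                else s) s) s with hstepdef
    have hinner : ∀ (key : String) (s : PySem.Set String) (x : String),
        x ∈ step s key ↔ x ∈ s ∨ (x ∈ careerIndicators ∧ PySem.Str.isIn x (PySem.Str.lower key) = true) := by
      intro key s x
      rw [hstepdef]
      have h1 : ∀ (i : Int) (s : PySem.Set String) (x : String),
          x ∈ indicatorLengths.foldl
              (fun s L =>
                if i + L ≤ PySem.Str.len (PySem.Str.lower key) ∧
                   PySem.Set.contains careerIndicatorSet
                     (PySem.Str.slice (PySem.Str.lower key) (some i) (some (i + L))) = true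
                then PySem.Set.add s (PySem.Str.slice (PySem.Str.lower key) (some i) (some (i + L)))
                else s) s
            ↔ x ∈ s ∨ ∃ L ∈ indicatorLengths,
                (i + L ≤ PySem.Str.len (PySem.Str.lower key) ∧
                 PySem.Set.contains careerIndicatorSet
                   (PySem.Str.slice (PySem.Str.lower key) (some i) (some (i + L))) = true) ∧
                x = PySem.Str.slice (PySem.Str.lower key) (some i) (some (i + L)) := by
        intro i s x
        refine foldl_mem_of_step _
          (fun L x =>
            (i + L ≤ PySem.Str.len (PySem.Str.lower key) ∧
             PySem.Set.contains careerIndicatorSet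
               (PySem.Str.slice (PySem.Str.lower key) (some i) (some (i + L))) = true) ∧
            x = PySem.Str.slice (PySem.Str.lower key) (some i) (some (i + L)))
          ?_ indicatorLengths s x
        intro s L x
        split_ifs with h
        · rw [PySem.Set.mem_add]; tauto
        · tauto
      rw [foldl_mem_of_step _
            (fun i x => ∃ L ∈ indicatorLengths,
              (i + L ≤ PySem.Str.len (PySem.Str.lower key) ∧
               PySem.Set.contains careerIndicatorSet
                 (PySem.Str.slice (PySem.Str.lower key) (some i) (some (i + L))) = true) ∧
              x = PySem.Str.slice (PySem.Str.lower key) (some i) (some (i + L)))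
            (fun s i x => h1 i s x) _ s x, ← key_scan_iff key x]
    have hmem : ∀ (x : String),
        x ∈ keys.foldl step PySem.Set.empty ↔
          x ∈ careerIndicators ∧ ∃ key ∈ keys, PySem.Str.isIn x (PySem.Str.lower key) = true := by
      intro x
      rw [foldl_mem_of_step step
            (fun key x => x ∈ careerIndicators ∧ PySem.Str.isIn x (PySem.Str.lower key) = true)
            (fun s key x => hinner key s x) keys PySem.Set.empty x]
      simp only [PySem.Set.empty]
      constructor
      · rintro (h | ⟨key, hk, hm, hi⟩)
        · simp at h
        · exact ⟨hm, key, hk, hi⟩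
      · rintro ⟨hm, key, hk, hi⟩
        exact Or.inr ⟨key, hk, hm, hi⟩
    have hnd : (keys.foldl step PySem.Set.empty).Nodup := by
      refine foldl_nodup_of_step step ?_ keys PySem.Set.empty (by simp [PySem.Set.empty])
      intro s key h
      rw [hstepdef]
      refine foldl_nodup_of_step _ ?_ _ s h
      intro s i h
      refine foldl_nodup_of_step _ ?_ _ s h
      intro s L h
      split_ifs with hc
      · exact PySem.Set.nodup_add _ _ h
      · exact h
    set p : String → Bool := fun indicator =>
      (keys.map (fun key => PySem.Str.lower key)).any (fun key => PySem.Str.isIn indicator key) with hp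
    have hsum : (careerIndicators.map (fun indicator =>
        if (keys.map (fun key => PySem.Str.lower key)).any (fun key => PySem.Str.isIn indicator key)
        then (1 : Int) else 0)).sum = (careerIndicators.countP p : Int) := by
      rw [hp]; exact PySem.List.sum_map_ite_one_zero _ _
    have hperm : (keys.foldl step PySem.Set.empty).Perm (careerIndicators.filter p) := by
      rw [List.perm_ext_iff_of_nodup hnd (List.Nodup.filter p (by decide : careerIndicators.Nodup))]
      intro x
      rw [hmem, List.mem_filter, hp]
      simp [List.any_map, List.any_eq_true, Function.comp]
    have hlen2 : (keys.foldl step PySem.Set.empty).length = careerIndicators.countP p := by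
      rw [List.countP_eq_length_filter]; exact hperm.length_eq
    have hlen : PySem.Set.len (keys.foldl step PySem.Set.empty) = (careerIndicators.countP p : Int) := by
      simp only [PySem.Set.len, hlen2]
    simp only [hsum, hlen]
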